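-- pv_equiv track=rewrite | github.com/Yolloh/match3 | match3.py | _slideDownRow
-- ===== SOURCE A (Python) =====
-- def _slideDownRow( topRow, bottomRow):
--     slideOccurred = False
--     newTopRow = []
--     newBottomRow = []
--     for topCell,bottomCell in zip(topRow, bottomRow):
--         if bottomCell is None and topCell is not None:
--             bottomCell = topCell
--             topCell = None
--             slideOccurred = True
--         newTopRow.append( topCell)
--         newBottomRow.append( bottomCell)
--     return (slideOccurred, newTopRow, newBottomRow)
-- ===== SOURCE B (Python) =====
-- def _slideDownRow(topRow, bottomRow):
--     # Recursive decomposition, building the result rows back-to-front.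
--     # Branches only on the bottom cell being empty: when it is, the new top
--     # cell is None and the new bottom cell is the top cell regardless of the
--     # top cell's value (if both are None nothing observable changes), and the
--     # slide flag picks up whether a non-empty cell actually moved.
--     if not topRow or not bottomRow:
--         return (False, [], [])
--     t, b = topRow[0], bottomRow[0]
--     occ, restTop, restBottom = _slideDownRow(topRow[1:], bottomRow[1:])
--     if b is None:
--         return (occ or t is not None, [None] + restTop, [t] + restBottom)
--     return (occ, [t] + restTop, [b] + restBottom)
-- ===== Notes on version B (the rewrite author's own statement) =====
-- stated objective: alternative
-- what changed: Replaces A's iterative fused loop with mutable accumulators by structural recursion building both rows back-to-front, and restructures the per-cell rule to branch only on the bottom cell being empty (the top cell's value is absorbed algebraically, surfacing only in the slide flag).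
import Mathlib
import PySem

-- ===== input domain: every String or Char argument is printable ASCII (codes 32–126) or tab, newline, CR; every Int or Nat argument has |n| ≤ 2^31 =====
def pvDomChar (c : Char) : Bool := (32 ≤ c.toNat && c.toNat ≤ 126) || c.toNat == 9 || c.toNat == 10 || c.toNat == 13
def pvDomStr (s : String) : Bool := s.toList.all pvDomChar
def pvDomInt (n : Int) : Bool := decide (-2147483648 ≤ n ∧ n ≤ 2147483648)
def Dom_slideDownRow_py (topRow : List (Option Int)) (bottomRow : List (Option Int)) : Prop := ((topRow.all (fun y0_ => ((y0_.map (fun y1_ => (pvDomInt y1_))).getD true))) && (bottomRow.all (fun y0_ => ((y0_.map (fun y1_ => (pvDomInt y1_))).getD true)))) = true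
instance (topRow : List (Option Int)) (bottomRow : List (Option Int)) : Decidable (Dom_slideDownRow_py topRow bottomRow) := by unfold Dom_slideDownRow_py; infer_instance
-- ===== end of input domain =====

-- B re-derives the result by structural recursion back-to-front, branching only on
-- the bottom cell being empty; objective: alternative decomposition, not speed.


-- ===== PORT A =====
-- literal port of A: the loop body (rebinding bottomCell/topCell as the Python does), folded over the zipped rows
def slideStepA (st : Bool × List (Option Int) × List (Option Int)) (tb : Option Int × Option Int) : Bool × List (Option Int) × List (Option Int) :=
  let slideOccurred := st.1
  let newTopRow := st.2.1
  let newBottomRow := st.2.2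
  let topCell := tb.1
  let bottomCell := tb.2
  if bottomCell.isNone && topCell.isSome then
    -- bottomCell = topCell; topCell = None; slideOccurred = True
    (true, newTopRow ++ [none], newBottomRow ++ [topCell])
  else
    (slideOccurred, newTopRow ++ [topCell], newBottomRow ++ [bottomCell])

def slideDownRow_py (topRow : List (Option Int)) (bottomRow : List (Option Int)) : Bool × List (Option Int) × List (Option Int) :=
  (topRow.zip bottomRow).foldl slideStepA (false, [], [])

-- ===== PORT B =====
-- port of B: structural recursion building the rows back-to-front, branching only on the bottom cell
def slideDownRow_py_alt : List (Option Int) → List (Option Int) → Bool × List (Option Int) × List (Option Int)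
  | [], _ => (false, [], [])
  | _ :: _, [] => (false, [], [])
  | t :: ts, b :: bs =>
    let r := slideDownRow_py_alt ts bs
    if b.isNone then (r.1 || t.isSome, none :: r.2.1, t :: r.2.2)
    else (r.1, t :: r.2.1, b :: r.2.2)

-- ===== PRECONDITION & SPEC =====
def Spec_slideDownRow_py (topRow : List (Option Int)) (bottomRow : List (Option Int)) (out : Bool × List (Option Int) × List (Option Int)) : Prop := out = slideDownRow_py_alt topRow bottomRow
instance (topRow : List (Option Int)) (bottomRow : List (Option Int)) (out : Bool × List (Option Int) × List (Option Int)) : Decidable (Spec_slideDownRow_py topRow bottomRow out) := by unfold Spec_slideDownRow_py; infer_instance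

-- ===== CLAIM (what is proved, stated in full; the proofs are below) =====
def Claim_equal_slideDownRow_py : Prop := ∀ (topRow : List (Option Int)) (bottomRow : List (Option Int)), Dom_slideDownRow_py topRow bottomRow → Spec_slideDownRow_py topRow bottomRow (slideDownRow_py topRow bottomRow)

-- ===== LEMMAS AND PROOFS =====
-- canonical three-pass description of the zipped result, the meeting point of both programs
def slideSpec (l : List (Option Int × Option Int)) : Bool × List (Option Int) × List (Option Int) :=
  (l.any (fun tb => tb.2.isNone && tb.1.isSome),
   l.map (fun tb => if tb.2.isNone && tb.1.isSome then none else tb.1),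
   l.map (fun tb => if tb.2.isNone && tb.1.isSome then tb.1 else tb.2))

-- A's fold with arbitrary accumulators equals the canonical form appended behind them
theorem slideDownRow_fold_eq (l : List (Option Int × Option Int))
    (s : Bool) (nt nb : List (Option Int)) :
    l.foldl slideStepA (s, nt, nb)
    = (s || (slideSpec l).1, nt ++ (slideSpec l).2.1, nb ++ (slideSpec l).2.2) := by
  induction l generalizing s nt nb with
  | nil => simp [slideSpec]
  | cons hd tl ih =>
    simp only [List.foldl_cons, slideSpec, List.any_cons, List.map_cons]
    by_cases h : (hd.2.isNone && hd.1.isSome) = true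
    · rw [show slideStepA (s, nt, nb) hd = (true, nt ++ [none], nb ++ [hd.1]) from by
        simp [slideStepA, h], ih]
      simp [slideSpec, h]
    · rw [show slideStepA (s, nt, nb) hd = (s, nt ++ [hd.1], nb ++ [hd.2]) from by
        simp [slideStepA, h], ih]
      simp [slideSpec, h]

-- B's recursion also computes the canonical form of the zipped rows
theorem slideDownRow_alt_eq (topRow bottomRow : List (Option Int)) :
    slideDownRow_py_alt topRow bottomRow = slideSpec (topRow.zip bottomRow) := by
  induction topRow generalizing bottomRow with
  | nil => simp [slideDownRow_py_alt, slideSpec]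
  | cons t ts ih =>
    cases bottomRow with
    | nil => simp [slideDownRow_py_alt, slideSpec]
    | cons b bs =>
      simp only [slideDownRow_py_alt, ih, List.zip_cons_cons, slideSpec,
        List.any_cons, List.map_cons]
      cases b with
      | some v => simp
      | none => cases t <;> simp

-- ===== VERDICT (by name: the statement is the Claim_ definition above) =====
theorem slideDownRow_py_spec : Claim_equal_slideDownRow_py := by
  intro topRow bottomRow _
  unfold Spec_slideDownRow_py slideDownRow_py
  rw [slideDownRow_fold_eq, slideDownRow_alt_eq]
  simp
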